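-- pv_equiv track=rewrite | github.com/North-Shore-AI/tinkerer | thinker/logic/betti.py | _determine_polarity_conflict
-- ===== SOURCE A (Python) =====
-- from typing import Dict, Iterable, List, Sequence, Tuple
--
-- Relation = Tuple[str, str, str]
--
-- def _normalize_claim_id(identifier: str) -> str:
--     return identifier.strip().lower()
--
-- def _determine_polarity_conflict(relations: Sequence[Relation], target: str = "c1") -> bool:
--     """Returns True when a claim receives both support and refute edges."""
--     target = _normalize_claim_id(target)
--     polarities = {"supports": False, "refutes": False}
--     for src, label, dst in relations:
--         if _normalize_claim_id(dst) != target: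
--             continue
--         lbl = label.lower()
--         if lbl in polarities:
--             polarities[lbl] = True
--         if polarities["supports"] and polarities["refutes"]:
--             return True
--     return False
-- ===== SOURCE B (Python) =====
-- from typing import Dict, Iterable, List, Sequence, Tuple
--
-- Relation = Tuple[str, str, str]
--
-- def _normalize_claim_id(identifier: str) -> str:
--     return identifier.strip().lower()
--
-- def _determine_polarity_conflict(relations: Sequence[Relation], target: str = "c1") -> bool:
--     t = _normalize_claim_id(target)
--
--     def _has(polarity: str) -> bool:
--         return any(
--             label.lower() == polarity
--             for _src, label, dst in relations
--             if _normalize_claim_id(dst) == t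
--         )
--
--     return _has("supports") and _has("refutes")
-- ===== Notes on version B (the rewrite author's own statement) =====
-- stated objective: idiomatic
-- what changed: Replaces A's single scan with mutable two-flag dict state and early exit by two independent any() passes (exists-a-support and exists-a-refute), with no mutable state.
import Mathlib
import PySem

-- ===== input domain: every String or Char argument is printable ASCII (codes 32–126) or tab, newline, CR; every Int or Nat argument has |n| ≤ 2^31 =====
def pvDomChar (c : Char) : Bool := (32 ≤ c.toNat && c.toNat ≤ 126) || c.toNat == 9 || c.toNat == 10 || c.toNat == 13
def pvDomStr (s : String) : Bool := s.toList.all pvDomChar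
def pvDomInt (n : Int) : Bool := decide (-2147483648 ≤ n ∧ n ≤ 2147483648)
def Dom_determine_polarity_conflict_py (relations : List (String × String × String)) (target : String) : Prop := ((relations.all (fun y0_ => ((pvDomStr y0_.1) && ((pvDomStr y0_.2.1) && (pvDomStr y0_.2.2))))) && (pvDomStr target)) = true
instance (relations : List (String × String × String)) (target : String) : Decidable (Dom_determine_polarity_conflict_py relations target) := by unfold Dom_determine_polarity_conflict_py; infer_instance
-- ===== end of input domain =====

-- B replaces A's two-flag mutable-dict scan with early exit by two independent any() passes; idiomatic, same cost.

-- ===== PORT A =====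
-- _normalize_claim_id
def pvNormA (s : String) : String := PySem.Str.lower (PySem.Str.strip s)

-- the for-loop of A, carrying the dict {"supports": sup, "refutes": ref} as two Bools
def pvLoopA (t : String) : List (String × String × String) → Bool → Bool → Bool
  | [], _, _ => false
  | (_, label, dst) :: rest, sup, ref =>
    if !(pvNormA dst == t) then pvLoopA t rest sup ref
    else
      let lbl := PySem.Str.lower label
      let sup' := if lbl == "supports" then true else sup
      let ref' := if lbl == "refutes" then true else ref
      if sup' && ref' then true else pvLoopA t rest sup' ref'

def determine_polarity_conflict_py (relations : List (String × String × String)) (target : String) : Bool :=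
  pvLoopA (pvNormA target) relations false false

-- ===== PORT B =====
def pvNormB (s : String) : String := PySem.Str.lower (PySem.Str.strip s)

-- "any(label.lower() == polarity for _src, label, dst in relations if _normalize_claim_id(dst) == t)"
def pvHas (relations : List (String × String × String)) (t polarity : String) : Bool :=
  relations.any (fun x => (pvNormB x.2.2 == t) && (PySem.Str.lower x.2.1 == polarity))

def determine_polarity_conflict_py_alt (relations : List (String × String × String)) (target : String) : Bool :=
  let t := pvNormB target
  pvHas relations t "supports" && pvHas relations t "refutes"

-- ===== PRECONDITION & SPEC =====
def Spec_determine_polarity_conflict_py (relations : List (String × String × String)) (target : String) (out : Bool) : Prop := out = determine_polarity_conflict_py_alt relations target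
instance (relations : List (String × String × String)) (target : String) (out : Bool) : Decidable (Spec_determine_polarity_conflict_py relations target out) := by unfold Spec_determine_polarity_conflict_py; infer_instance

-- ===== CLAIM (what is proved, stated in full; the proofs are below) =====
def Claim_equal_determine_polarity_conflict_py : Prop := ∀ (relations : List (String × String × String)) (target : String), Dom_determine_polarity_conflict_py relations target → Spec_determine_polarity_conflict_py relations target (determine_polarity_conflict_py relations target)

-- ===== LEMMAS AND PROOFS =====
-- Loop invariant: with flags (sup, ref) not yet both set, A's loop computes
-- (sup ∨ ∃ supports-match) ∧ (ref ∨ ∃ refutes-match).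
lemma pvLoopA_eq (t : String) (rel : List (String × String × String)) :
    ∀ sup ref : Bool, (sup && ref) = false →
      pvLoopA t rel sup ref =
        ((sup || pvHas rel t "supports") && (ref || pvHas rel t "refutes")) := by
  induction rel with
  | nil =>
      intro sup ref h
      simp only [pvLoopA, pvHas, List.any_nil, Bool.or_false]
      cases sup <;> cases ref <;> simp_all
  | cons hd tl ih =>
      intro sup ref h
      obtain ⟨src, label, dst⟩ := hd
      simp only [pvLoopA, pvHas, List.any_cons]
      by_cases hm : pvNormA dst = t
      · have hm2 : (pvNormB dst == t) = true := beq_iff_eq.mpr hm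
        rw [if_neg (by simp [hm])]
        by_cases hs : PySem.Str.lower label = "supports" <;>
          by_cases hr : PySem.Str.lower label = "refutes"
        · exact absurd (hs ▸ hr) (by intro hc; exact absurd hc (by decide))
        · simp only [hs, beq_self_eq_true, if_true,
            (by decide : (("supports" : String) == "refutes") = false)]
          cases ref with
          | true => simp [hm2]
          | false =>
              simp only [Bool.false_eq_true, if_false, Bool.and_false]
              rw [ih true false rfl]
              simp [pvHas, hm2]
        · simp only [hr, beq_self_eq_true, if_true,
            (by decide : (("refutes" : String) == "supports") = false)]
          cases sup with
          | true => simp [hm2]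
          | false =>
              simp only [Bool.false_eq_true, if_false, Bool.false_and]
              rw [ih false true rfl]
              simp [pvHas, hm2]
        · have hs2 : (PySem.Str.lower label == "supports") = false := by
            simpa using hs
          have hr2 : (PySem.Str.lower label == "refutes") = false := by
            simpa using hr
          simp only [hs2, hr2, Bool.false_eq_true, if_false, h, ih sup ref h]
          simp [pvHas]
      · have hm2 : (pvNormB dst == t) = false := by simpa using hm
        rw [if_pos (by simp [pvNormA]; simpa [pvNormB] using hm), ih sup ref h]
        simp [pvHas, hm2]

-- ===== VERDICT (by name: the statement is the Claim_ definition above) =====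
theorem determine_polarity_conflict_py_spec : Claim_equal_determine_polarity_conflict_py := by
  intro relations target _
  unfold Spec_determine_polarity_conflict_py determine_polarity_conflict_py determine_polarity_conflict_py_alt
  rw [pvLoopA_eq _ _ false false rfl]
  simp [pvNormA, pvNormB]
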